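-- pv_equiv track=rewrite | github.com/xingyug/service2mcp | apps/mcp_runtime/proxy_utils.py | _has_unescaped_dot
-- ===== SOURCE A (Python) =====
-- def _has_unescaped_dot(path: str) -> bool:
--     r"""Return True if *path* contains at least one unescaped dot."""
--     i = 0
--     while i < len(path):
--         if path[i] == "\\" and i + 1 < len(path) and path[i + 1] == ".":
--             i += 2
--         elif path[i] == ".":
--             return True
--         else:
--             i += 1
--     return False
-- ===== SOURCE B (Python) =====
-- def _has_unescaped_dot(path: str) -> bool:
--     r"""Return True if *path* contains at least one unescaped dot."""
--     return "." in path.replace("\\.", "")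
-- ===== Notes on version B (the rewrite author's own statement) =====
-- stated objective: idiomatic
-- what changed: Replaces the manual index/lookahead while-loop with a transform-then-membership approach: first remove every escaped dot via str.replace, then test whether a dot remains as a substring.
import Mathlib
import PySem

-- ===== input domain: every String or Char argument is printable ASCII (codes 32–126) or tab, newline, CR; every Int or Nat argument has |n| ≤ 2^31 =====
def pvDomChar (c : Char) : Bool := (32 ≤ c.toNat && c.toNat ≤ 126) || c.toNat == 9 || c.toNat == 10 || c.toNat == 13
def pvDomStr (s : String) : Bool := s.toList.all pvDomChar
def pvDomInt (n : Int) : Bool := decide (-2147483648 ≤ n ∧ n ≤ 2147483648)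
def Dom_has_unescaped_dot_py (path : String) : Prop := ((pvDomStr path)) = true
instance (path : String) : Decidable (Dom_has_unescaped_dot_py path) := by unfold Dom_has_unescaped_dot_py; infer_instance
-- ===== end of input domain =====

-- B replaces A's index/lookahead while-loop by removing escaped dots with str.replace and a substring-membership test (idiomatic; a timing run measured B faster at the largest size).
-- ===== PORT A =====
-- A's while-loop over the index, as structural recursion over the remaining characters
-- (the same state: the branch order and the 1-or-2-step advance are kept verbatim).
def hudLoopA : List Char → Bool
  | [] => false
  | c :: t =>
    if c == '\\' && (t.head?.getD ' ' == '.') && t ≠ [] then hudLoopA (t.drop 1)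
    else if c == '.' then true
    else hudLoopA t
  termination_by l => l.length
  decreasing_by
    · simp
    · simp

def has_unescaped_dot_py (path : String) : Bool := hudLoopA path.toList

-- ===== PORT B =====
def has_unescaped_dot_py_alt (path : String) : Bool :=
  PySem.Str.isIn "." (PySem.Str.replace path "\\." "")

-- ===== PRECONDITION & SPEC =====
def Spec_has_unescaped_dot_py (path : String) (out : Bool) : Prop := out = has_unescaped_dot_py_alt path
instance (path : String) (out : Bool) : Decidable (Spec_has_unescaped_dot_py path out) := by unfold Spec_has_unescaped_dot_py; infer_instance

-- ===== CLAIM (what is proved, stated in full; the proofs are below) =====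
def Claim_equal_has_unescaped_dot_py : Prop := ∀ (path : String), Dom_has_unescaped_dot_py path → Spec_has_unescaped_dot_py path (has_unescaped_dot_py path)

-- ===== LEMMAS AND PROOFS =====

-- ===== VERDICT (by name: the statement is the Claim_ definition above) =====
-- rep l = l with every (non-overlapping, left-to-right) occurrence of "\\." removed;
-- this is exactly what Chars.replace.go computes when its fuel covers l.length.
def hudRep : List Char → List Char
  | [] => []
  | c :: t =>
    if ['\\', '.'].isPrefixOf (c :: t) then hudRep (t.drop 1) else c :: hudRep t
  termination_by l => l.length
  decreasing_by
    · simp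
    · simp

theorem hudGo_eq_rep (fuel : Nat) (l acc : List Char) (h : l.length ≤ fuel) :
    PySem.Chars.replace.go ['\\', '.'] [] fuel l acc = acc.reverse ++ hudRep l := by
  induction fuel generalizing l acc with
  | zero =>
    cases l with
    | nil => simp [PySem.Chars.replace.go, hudRep]
    | cons c t => simp at h
  | succ n ih =>
    cases l with
    | nil => simp [PySem.Chars.replace.go, hudRep]
    | cons c t =>
      rw [PySem.Chars.replace.go, hudRep]
      split
      · rename_i hp
        rw [ih]
        · simp
        · simp at h ⊢; omega
      · rw [ih]
        · simp
        · simp at h ⊢; omega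

theorem hudLoopA_iff_mem (l : List Char) :
    hudLoopA l = true ↔ '.' ∈ hudRep l := by
  induction l using hudLoopA.induct with
  | case1 => simp [hudLoopA, hudRep]
  | case2 c t hc ih =>
    simp only [Bool.and_eq_true, beq_iff_eq, decide_eq_true_eq, ne_eq] at hc
    obtain ⟨⟨hc1, hc2⟩, hc3⟩ := hc
    cases t with
    | nil => exact absurd rfl hc3
    | cons d t' =>
      simp only [List.head?_cons, Option.getD_some] at hc2
      subst hc1; subst hc2
      rw [hudLoopA, hudRep]
      simp only [List.isPrefixOf, List.drop_succ_cons, List.drop_zero]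
      simpa using ih
  | case3 c t hc hdot =>
    have hdot' : c = '.' := by simpa using hdot
    subst hdot'
    rw [hudLoopA, hudRep]
    simp [List.isPrefixOf]
  | case4 c t hc hdot ih =>
    rw [Bool.not_eq_true] at hc hdot
    have hpre : ['\\', '.'].isPrefixOf (c :: t) = false := by
      cases t with
      | nil => simp [List.isPrefixOf]
      | cons d t' =>
        simp only [List.head?_cons, Option.getD_some, ne_eq, reduceCtorEq, not_false_eq_true, decide_true, Bool.and_true,
          Bool.and_eq_false_iff, beq_eq_false_iff_ne] at hc
        simp only [List.isPrefixOf, Bool.and_eq_false_iff, beq_eq_false_iff_ne, ne_eq]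
        rcases hc with h | h
        · exact Or.inl (Ne.symm h)
        · exact Or.inr (Or.inl (Ne.symm (by simpa using h)))
    rw [hudLoopA, hudRep]
    have hne : ¬ ('.' = c) := fun h => by simp [← h] at hdot
    rw [hc, hdot, hpre]
    simp [hne]
    exact ih

theorem hud_singleton_infix (l : List Char) :
    ['.'] <:+: l ↔ '.' ∈ l := by
  constructor
  · intro h
    exact h.subset (by simp)
  · intro h
    obtain ⟨s, t, rfl⟩ := List.append_of_mem h
    exact ⟨s, t, by simp⟩

-- ===== VERDICT (by name: the statement is the Claim_ definition above) =====
theorem has_unescaped_dot_py_spec : Claim_equal_has_unescaped_dot_py := by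
  intro path _
  unfold Spec_has_unescaped_dot_py has_unescaped_dot_py has_unescaped_dot_py_alt
  rw [PySem.Str.replace]
  have hrep : PySem.Chars.replace path.toList ['\\', '.'] [] =
      hudRep path.toList := by
    rw [PySem.Chars.replace, if_neg (by simp)]
    simpa using hudGo_eq_rep path.toList.length path.toList [] le_rfl
  have : PySem.Str.isIn "." (String.ofList (PySem.Chars.replace path.toList (String.toList "\\.") (String.toList ""))) =
      PySem.Chars.isIn ['.'] (hudRep path.toList) := by
    simp [PySem.Str.isIn, hrep]
  rw [this]
  rcases hmem : decide ('.' ∈ hudRep path.toList) with _ | _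
  · simp at hmem
    have h1 : hudLoopA path.toList = false := by
      rw [← Bool.not_eq_true, hudLoopA_iff_mem]; exact hmem
    have h2 : PySem.Chars.isIn ['.'] (hudRep path.toList) = false := by
      rw [PySem.Chars.isIn_eq_false_iff, hud_singleton_infix]
      exact hmem
    rw [h1, h2]
  · simp at hmem
    have h1 : hudLoopA path.toList = true := (hudLoopA_iff_mem _).2 hmem
    have h2 : PySem.Chars.isIn ['.'] (hudRep path.toList) = true := by
      rw [PySem.Chars.isIn_iff_infix, hud_singleton_infix]
      exact hmem
    rw [h1, h2]
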